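-- pv_equiv track=rewrite | github.com/yebinchon/xstack-benchmark | polybench-lilac/LLMTransformation/transformations/parenthesis_cleanup.py | _split_code_segments
-- ===== SOURCE A (Python) =====
-- from typing import Dict, List, Any, Tuple, Set
--
-- def _split_code_segments(code: str) -> List[Tuple[bool, str]]:
--     """Split code into segments that are code vs non-code (comments/strings)."""
--     segments = []
--     i = 0
--     n = len(code)
--     last = 0
--     in_block = False
--     in_line = False
--     in_str = False
--     in_char = False
--
--     while i < n:
--         ch = code[i]
--         nxt = code[i+1] if i + 1 < n else ''
--
--         if in_block:
--             if ch == '*' and nxt == '/':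
--                 i += 2
--                 segments.append((False, code[last:i]))
--                 last = i
--                 in_block = False
--                 continue
--             i += 1
--             continue
--         if in_line:
--             if ch == '\n':
--                 i += 1
--                 segments.append((False, code[last:i]))
--                 last = i
--                 in_line = False
--                 continue
--             i += 1
--             continue
--         if in_str:
--             if ch == '\\':
--                 i += 2
--                 continue
--             if ch == '"':
--                 i += 1
--                 segments.append((False, code[last:i]))
--                 last = i
--                 in_str = False
--                 continue
--             i += 1
--             continue
--         if in_char:
--             if ch == '\\':
--                 i += 2
--                 continue
--             if ch == "'":
--                 i += 1
--                 segments.append((False, code[last:i]))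
--                 last = i
--                 in_char = False
--                 continue
--             i += 1
--             continue
--
--         # Not in any special context; check for openings
--         if ch == '/' and nxt == '*':
--             if i > last:
--                 segments.append((True, code[last:i]))
--             in_block = True
--             last = i
--             i += 2
--             continue
--         if ch == '/' and nxt == '/':
--             if i > last:
--                 segments.append((True, code[last:i]))
--             in_line = True
--             last = i
--             i += 2
--             continue
--         if ch == '"':
--             if i > last:
--                 segments.append((True, code[last:i]))
--             in_str = True
--             last = i
--             i += 1
--             continue
--         if ch == "'":
--             if i > last:
--                 segments.append((True, code[last:i]))
--             in_char = True
--             last = i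
--             i += 1
--             continue
--         i += 1
--
--     # Flush remainder
--     if last < n:
--         if in_block or in_line or in_str or in_char:
--             segments.append((False, code[last:]))
--         else:
--             segments.append((True, code[last:]))
--
--     return segments
-- ===== SOURCE B (Python) =====
-- from typing import Dict, List, Any, Tuple, Set
--
--
-- def _scan_quoted(code: str, j: int, q: str) -> int:
--     """End index (exclusive) of a quoted literal whose opening quote precedes j."""
--     n = len(code)
--     while j < n:
--         if code[j] == '\\':
--             j += 2
--         elif code[j] == q:
--             return j + 1
--         else:
--             j += 1
--     return n
--
--
-- def _match_token(code: str, i: int):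
--     """If a comment/string/char token starts at i, return its end index, else None."""
--     n = len(code)
--     if code.startswith('/*', i):
--         j = code.find('*/', i + 2)
--         return n if j < 0 else j + 2
--     if code.startswith('//', i):
--         j = code.find('\n', i + 2)
--         return n if j < 0 else j + 1
--     if code[i] == '"':
--         return _scan_quoted(code, i + 1, '"')
--     if code[i] == "'":
--         return _scan_quoted(code, i + 1, "'")
--     return None
--
--
-- def _split_code_segments(code: str) -> List[Tuple[bool, str]]:
--     """Split code into segments that are code vs non-code (comments/strings)."""
--     segments = []
--     n = len(code)
--     prev = 0
--     i = 0
--     while i < n: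
--         end = _match_token(code, i)
--         if end is None:
--             i += 1
--             continue
--         if i > prev:
--             segments.append((True, code[prev:i]))
--         segments.append((False, code[i:end]))
--         prev = i = end
--     if prev < n:
--         segments.append((True, code[prev:]))
--     return segments
-- ===== Notes on version B (the rewrite author's own statement) =====
-- stated objective: alternative
-- what changed: B replaces A's per-character mode-flag state machine (in_block/in_line/in_str/in_char with a running 'last' index) by a whole-token tokenizer: at each position it tries to match a complete comment/string/char token (block and line comments found by str.find jumps, quoted literals by one shared scanner) and emits the pending code slice plus the whole token at once.
import Mathlib
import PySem

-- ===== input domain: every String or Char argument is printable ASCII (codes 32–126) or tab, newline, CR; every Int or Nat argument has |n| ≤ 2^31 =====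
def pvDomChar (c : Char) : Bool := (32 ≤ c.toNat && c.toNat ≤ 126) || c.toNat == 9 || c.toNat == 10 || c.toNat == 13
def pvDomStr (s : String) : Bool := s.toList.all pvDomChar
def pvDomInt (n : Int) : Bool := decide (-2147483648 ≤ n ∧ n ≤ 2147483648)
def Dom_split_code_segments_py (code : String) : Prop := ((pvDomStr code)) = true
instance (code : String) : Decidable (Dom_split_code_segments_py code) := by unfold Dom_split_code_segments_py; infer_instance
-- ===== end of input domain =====

-- B replaces A's per-character mode-flag state machine by a whole-token tokenizer
-- (match a complete comment/string/char token at each position, emit it at once);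
-- same output, a genuinely different traversal (objective: alternative).

-- ===== PORT A =====
-- A's while-loop, ported over the character list: `pend` is code[last:i] (the slice
-- between `last` and the cursor), the four Bools are A's mode flags in A's test order;
-- `i += 2` becomes `rest.drop 1` after consuming the head.
def pvLoopA (cs pend : List Char) (in_block in_line in_str in_char : Bool) :
    List (Bool × String) :=
  match cs with
  | [] =>
    -- A's final flush: `if last < n` is `pend ≠ []`
    if pend.isEmpty then []
    else [(!(in_block || in_line || in_str || in_char), String.ofList pend)]
  | c :: rest =>
    if in_block then
      if c = '*' ∧ rest.head? = some '/' then
        (false, String.ofList (pend ++ ['*', '/'])) ::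
          pvLoopA (rest.drop 1) [] false in_line in_str in_char
      else pvLoopA rest (pend ++ [c]) in_block in_line in_str in_char
    else if in_line then
      if c = '\n' then
        (false, String.ofList (pend ++ ['\n'])) ::
          pvLoopA rest [] in_block false in_str in_char
      else pvLoopA rest (pend ++ [c]) in_block in_line in_str in_char
    else if in_str then
      if c = '\\' then pvLoopA (rest.drop 1) (pend ++ c :: rest.take 1) in_block in_line in_str in_char
      else if c = '"' then
        (false, String.ofList (pend ++ ['"'])) ::
          pvLoopA rest [] in_block in_line false in_char
      else pvLoopA rest (pend ++ [c]) in_block in_line in_str in_char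
    else if in_char then
      if c = '\\' then pvLoopA (rest.drop 1) (pend ++ c :: rest.take 1) in_block in_line in_str in_char
      else if c = '\'' then
        (false, String.ofList (pend ++ ['\''])) ::
          pvLoopA rest [] in_block in_line in_str false
      else pvLoopA rest (pend ++ [c]) in_block in_line in_str in_char
    else
      if c = '/' ∧ rest.head? = some '*' then
        (if pend.isEmpty then [] else [(true, String.ofList pend)]) ++
          pvLoopA (rest.drop 1) ['/', '*'] true in_line in_str in_char
      else if c = '/' ∧ rest.head? = some '/' then
        (if pend.isEmpty then [] else [(true, String.ofList pend)]) ++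
          pvLoopA (rest.drop 1) ['/', '/'] in_block true in_str in_char
      else if c = '"' then
        (if pend.isEmpty then [] else [(true, String.ofList pend)]) ++
          pvLoopA rest ['"'] in_block in_line true in_char
      else if c = '\'' then
        (if pend.isEmpty then [] else [(true, String.ofList pend)]) ++
          pvLoopA rest ['\''] in_block in_line in_str true
      else pvLoopA rest (pend ++ [c]) in_block in_line in_str in_char
termination_by cs.length
decreasing_by all_goals (simp <;> omega)

def split_code_segments_py (code : String) : List (Bool × String) :=
  pvLoopA code.toList [] false false false false

-- ===== PORT B =====
-- Source B's helpers over the character list: pvBlockBody/pvLineBody are the `find`-based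
-- comment scans (consumed token tail, remainder), pvQuotedBody is _scan_quoted.
def pvBlockBody : List Char → List Char × List Char
  | [] => ([], [])
  | c :: rest =>
    if c = '*' ∧ rest.head? = some '/' then (['*', '/'], rest.drop 1)
    else
      let p := pvBlockBody rest
      (c :: p.1, p.2)

def pvLineBody : List Char → List Char × List Char
  | [] => ([], [])
  | c :: rest =>
    if c = '\n' then (['\n'], rest)
    else
      let p := pvLineBody rest
      (c :: p.1, p.2)

-- _scan_quoted: `j += 2` on backslash becomes consuming `c :: rest.take 1`.
def pvQuotedBody (q : Char) : List Char → List Char × List Char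
  | [] => ([], [])
  | c :: rest =>
    if c = '\\' then
      let p := pvQuotedBody q (rest.drop 1)
      (c :: rest.take 1 ++ p.1, p.2)
    else if c = q then ([c], rest)
    else
      let p := pvQuotedBody q rest
      (c :: p.1, p.2)
termination_by cs => cs.length
decreasing_by all_goals (simp <;> omega)

-- _match_token: whole token starting here (token chars, remainder), else none.
def pvMatchToken : List Char → Option (List Char × List Char)
  | [] => none
  | c :: rest =>
    if c = '/' ∧ rest.head? = some '*' then
      let p := pvBlockBody (rest.drop 1)
      some ('/' :: '*' :: p.1, p.2)
    else if c = '/' ∧ rest.head? = some '/' then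
      let p := pvLineBody (rest.drop 1)
      some ('/' :: '/' :: p.1, p.2)
    else if c = '"' then
      let p := pvQuotedBody '"' rest
      some (c :: p.1, p.2)
    else if c = '\'' then
      let p := pvQuotedBody '\'' rest
      some (c :: p.1, p.2)
    else none

theorem pvBlockBody_len (cs : List Char) : (pvBlockBody cs).2.length ≤ cs.length := by
  induction cs with
  | nil => simp [pvBlockBody]
  | cons c rest ih =>
    simp only [pvBlockBody]
    split
    · simp [List.length_drop]; omega
    · simpa using Nat.le_succ_of_le ih

theorem pvLineBody_len (cs : List Char) : (pvLineBody cs).2.length ≤ cs.length := by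
  induction cs with
  | nil => simp [pvLineBody]
  | cons c rest ih =>
    simp only [pvLineBody]
    split
    · simp
    · simpa using Nat.le_succ_of_le ih

theorem pvQuotedBody_len (q : Char) (k : Nat) :
    ∀ cs : List Char, cs.length ≤ k → (pvQuotedBody q cs).2.length ≤ cs.length := by
  induction k with
  | zero =>
    intro cs h
    match cs with
    | [] => simp [pvQuotedBody]
    | c :: rest => simp at h
  | succ k ih =>
    intro cs h
    match cs with
    | [] => simp [pvQuotedBody]
    | c :: rest =>
      simp only [pvQuotedBody]
      split
      · have h1 : (rest.drop 1).length ≤ k := by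
          simp only [List.length_cons] at h; simp [List.length_drop]; omega
        have := ih (rest.drop 1) h1
        simp [List.length_drop] at this ⊢; omega
      · split
        · simp
        · have h1 : rest.length ≤ k := by simp only [List.length_cons] at h; omega
          simpa using Nat.le_succ_of_le (ih rest h1)

theorem pvMatchToken_len {cs tok rem : List Char}
    (h : pvMatchToken cs = some (tok, rem)) : rem.length < cs.length := by
  match cs with
  | [] => simp [pvMatchToken] at h
  | c :: rest =>
    simp only [pvMatchToken] at h
    split at h
    · simp only [Option.some.injEq, Prod.mk.injEq] at h
      have := pvBlockBody_len (rest.drop 1)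
      simp [← h.2, List.length_drop] at this ⊢; omega
    · split at h
      · simp only [Option.some.injEq, Prod.mk.injEq] at h
        have := pvLineBody_len (rest.drop 1)
        simp [← h.2, List.length_drop] at this ⊢; omega
      · split at h
        · simp only [Option.some.injEq, Prod.mk.injEq] at h
          have := pvQuotedBody_len '"' rest.length rest le_rfl
          simp [← h.2] at this ⊢; omega
        · split at h
          · simp only [Option.some.injEq, Prod.mk.injEq] at h
            have := pvQuotedBody_len '\'' rest.length rest le_rfl
            simp [← h.2] at this ⊢; omega
          · simp at h

-- Source B's main loop: advance until a token matches, emitting pending code (= code[prev:i])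
-- before each token and the trailing code slice at the end.
def pvScanB (cs pend : List Char) : List (Bool × String) :=
  match cs with
  | [] => if pend.isEmpty then [] else [(true, String.ofList pend)]
  | c :: rest =>
    match h : pvMatchToken (c :: rest) with
    | some (tok, rem) =>
      (if pend.isEmpty then [] else [(true, String.ofList pend)]) ++
        (false, String.ofList tok) :: pvScanB rem []
    | none => pvScanB rest (pend ++ [c])
termination_by cs.length
decreasing_by
  · exact pvMatchToken_len h
  · simp

def split_code_segments_py_alt (code : String) : List (Bool × String) :=
  pvScanB code.toList []

-- ===== PRECONDITION & SPEC =====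
def Spec_split_code_segments_py (code : String) (out : List (Bool × String)) : Prop := out = split_code_segments_py_alt code
instance (code : String) (out : List (Bool × String)) : Decidable (Spec_split_code_segments_py code out) := by unfold Spec_split_code_segments_py; infer_instance

-- ===== CLAIM (what is proved, stated in full; the proofs are below) =====
def Claim_equal_split_code_segments_py : Prop := ∀ (code : String), Dom_split_code_segments_py code → Spec_split_code_segments_py code (split_code_segments_py code)

-- ===== LEMMAS AND PROOFS =====

theorem pvScanB_cons_some {c : Char} {rest tok rem : List Char} (pend : List Char)
    (h : pvMatchToken (c :: rest) = some (tok, rem)) :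
    pvScanB (c :: rest) pend =
      (if pend.isEmpty then [] else [(true, String.ofList pend)]) ++
        (false, String.ofList tok) :: pvScanB rem [] := by
  rw [pvScanB]
  split
  · rename_i tok' rem' h'
    rw [h] at h'
    simp only [Option.some.injEq, Prod.mk.injEq] at h'
    obtain ⟨rfl, rfl⟩ := h'
    rfl
  · rename_i h'
    rw [h] at h'
    cases h'

theorem pvScanB_cons_none {c : Char} {rest : List Char} (pend : List Char)
    (h : pvMatchToken (c :: rest) = none) :
    pvScanB (c :: rest) pend = pvScanB rest (pend ++ [c]) := by
  rw [pvScanB]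
  split
  · rename_i tok' rem' h'
    rw [h] at h'
    cases h'
  · rfl

theorem pvLoopA_block (cs : List Char) : ∀ pend : List Char, pend ≠ [] →
    pvLoopA cs pend true false false false =
      (false, String.ofList (pend ++ (pvBlockBody cs).1)) ::
        pvLoopA (pvBlockBody cs).2 [] false false false false := by
  induction cs with
  | nil =>
    intro pend hp
    simp [pvLoopA, pvBlockBody, hp]
  | cons c rest ih =>
    intro pend hp
    by_cases hc : c = '*' ∧ rest.head? = some '/'
    · simp [pvLoopA, pvBlockBody, hc]
    · have hL : pvLoopA (c :: rest) pend true false false false =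
          pvLoopA rest (pend ++ [c]) true false false false := by
        simp [pvLoopA, hc]
      rw [hL, ih (pend ++ [c]) (by simp)]
      simp [pvBlockBody, hc, List.append_assoc]

theorem pvLoopA_line (cs : List Char) : ∀ pend : List Char, pend ≠ [] →
    pvLoopA cs pend false true false false =
      (false, String.ofList (pend ++ (pvLineBody cs).1)) ::
        pvLoopA (pvLineBody cs).2 [] false false false false := by
  induction cs with
  | nil =>
    intro pend hp
    simp [pvLoopA, pvLineBody, hp]
  | cons c rest ih =>
    intro pend hp
    by_cases hc : c = '\n'
    · subst hc
      simp [pvLoopA, pvLineBody]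
    · have hL : pvLoopA (c :: rest) pend false true false false =
          pvLoopA rest (pend ++ [c]) false true false false := by
        simp [pvLoopA, hc]
      rw [hL, ih (pend ++ [c]) (by simp)]
      simp [pvLineBody, hc, List.append_assoc]

theorem pvLoopA_str (k : Nat) : ∀ cs pend : List Char, cs.length ≤ k → pend ≠ [] →
    pvLoopA cs pend false false true false =
      (false, String.ofList (pend ++ (pvQuotedBody '"' cs).1)) ::
        pvLoopA (pvQuotedBody '"' cs).2 [] false false false false := by
  induction k with
  | zero =>
    intro cs pend hk hp
    match cs with
    | [] => simp [pvLoopA, pvQuotedBody, hp]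
    | c :: rest => simp at hk
  | succ k ih =>
    intro cs pend hk hp
    match cs with
    | [] => simp [pvLoopA, pvQuotedBody, hp]
    | c :: rest =>
      simp only [List.length_cons] at hk
      by_cases h1 : c = '\\'
      · have hL : pvLoopA (c :: rest) pend false false true false =
            pvLoopA (rest.drop 1) (pend ++ c :: rest.take 1) false false true false := by
          simp [pvLoopA, h1]
        rw [hL, ih (rest.drop 1) (pend ++ c :: rest.take 1)
            (by simp; omega) (by simp)]
        simp [pvQuotedBody, h1, List.append_assoc]
      · by_cases h2 : c = '"'
        · subst h2
          simp [pvLoopA, pvQuotedBody]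
        · have hL : pvLoopA (c :: rest) pend false false true false =
              pvLoopA rest (pend ++ [c]) false false true false := by
            simp [pvLoopA, h1, h2]
          rw [hL, ih rest (pend ++ [c]) (by omega) (by simp)]
          simp [pvQuotedBody, h1, h2, List.append_assoc]

theorem pvLoopA_char (k : Nat) : ∀ cs pend : List Char, cs.length ≤ k → pend ≠ [] →
    pvLoopA cs pend false false false true =
      (false, String.ofList (pend ++ (pvQuotedBody '\'' cs).1)) ::
        pvLoopA (pvQuotedBody '\'' cs).2 [] false false false false := by
  induction k with
  | zero =>
    intro cs pend hk hp
    match cs with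
    | [] => simp [pvLoopA, pvQuotedBody, hp]
    | c :: rest => simp at hk
  | succ k ih =>
    intro cs pend hk hp
    match cs with
    | [] => simp [pvLoopA, pvQuotedBody, hp]
    | c :: rest =>
      simp only [List.length_cons] at hk
      by_cases h1 : c = '\\'
      · have hL : pvLoopA (c :: rest) pend false false false true =
            pvLoopA (rest.drop 1) (pend ++ c :: rest.take 1) false false false true := by
          simp [pvLoopA, h1]
        rw [hL, ih (rest.drop 1) (pend ++ c :: rest.take 1)
            (by simp; omega) (by simp)]
        simp [pvQuotedBody, h1, List.append_assoc]
      · by_cases h2 : c = '\''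
        · subst h2
          simp [pvLoopA, pvQuotedBody]
        · have hL : pvLoopA (c :: rest) pend false false false true =
              pvLoopA rest (pend ++ [c]) false false false true := by
            simp [pvLoopA, h1, h2]
          rw [hL, ih rest (pend ++ [c]) (by omega) (by simp)]
          simp [pvQuotedBody, h1, h2, List.append_assoc]

theorem pvLoopA_eq_pvScanB (k : Nat) : ∀ cs pend : List Char, cs.length ≤ k →
    pvLoopA cs pend false false false false = pvScanB cs pend := by
  induction k with
  | zero =>
    intro cs pend hk
    match cs with
    | [] => simp [pvLoopA, pvScanB]
    | c :: rest => simp at hk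
  | succ k ih =>
    intro cs pend hk
    match cs with
    | [] => simp [pvLoopA, pvScanB]
    | c :: rest =>
      simp only [List.length_cons] at hk
      by_cases h1 : c = '/' ∧ rest.head? = some '*'
      · have hmt : pvMatchToken (c :: rest) =
            some ('/' :: '*' :: (pvBlockBody (rest.drop 1)).1, (pvBlockBody (rest.drop 1)).2) := by
          simp [pvMatchToken, h1]
        rw [pvScanB_cons_some pend hmt]
        have hL : pvLoopA (c :: rest) pend false false false false =
            (if pend.isEmpty then [] else [(true, String.ofList pend)]) ++
              pvLoopA (rest.drop 1) ['/', '*'] true false false false := by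
          simp [pvLoopA, h1]
        have hlen : (pvBlockBody (rest.drop 1)).2.length ≤ k := by
          have := pvBlockBody_len (rest.drop 1)
          simp only [List.length_drop] at this
          omega
        rw [hL, pvLoopA_block (rest.drop 1) ['/', '*'] (by simp),
          ih (pvBlockBody (rest.drop 1)).2 [] hlen]
        simp
      · by_cases h2 : c = '/' ∧ rest.head? = some '/'
        · have hmt : pvMatchToken (c :: rest) =
              some ('/' :: '/' :: (pvLineBody (rest.drop 1)).1, (pvLineBody (rest.drop 1)).2) := by
            simp [pvMatchToken, h1, h2]
          rw [pvScanB_cons_some pend hmt]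
          have hL : pvLoopA (c :: rest) pend false false false false =
              (if pend.isEmpty then [] else [(true, String.ofList pend)]) ++
                pvLoopA (rest.drop 1) ['/', '/'] false true false false := by
            simp [pvLoopA, h1, h2]
          have hlen : (pvLineBody (rest.drop 1)).2.length ≤ k := by
            have := pvLineBody_len (rest.drop 1)
            simp only [List.length_drop] at this
            omega
          rw [hL, pvLoopA_line (rest.drop 1) ['/', '/'] (by simp),
            ih (pvLineBody (rest.drop 1)).2 [] hlen]
          simp
        · by_cases h3 : c = '"'
          · subst h3
            have hmt : pvMatchToken ('"' :: rest) =
                some ('"' :: (pvQuotedBody '"' rest).1, (pvQuotedBody '"' rest).2) := by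
              simp [pvMatchToken, h1, h2]
            rw [pvScanB_cons_some pend hmt]
            have hL : pvLoopA ('"' :: rest) pend false false false false =
                (if pend.isEmpty then [] else [(true, String.ofList pend)]) ++
                  pvLoopA rest ['"'] false false true false := by
              simp [pvLoopA, h1, h2]
            have hlen : (pvQuotedBody '"' rest).2.length ≤ k := by
              have := pvQuotedBody_len '"' rest.length rest le_rfl
              omega
            rw [hL, pvLoopA_str rest.length rest ['"'] le_rfl (by simp),
              ih (pvQuotedBody '"' rest).2 [] hlen]
            simp
          · by_cases h4 : c = '\''
            · subst h4
              have hmt : pvMatchToken ('\'' :: rest) =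
                  some ('\'' :: (pvQuotedBody '\'' rest).1, (pvQuotedBody '\'' rest).2) := by
                simp [pvMatchToken, h1, h2]
              rw [pvScanB_cons_some pend hmt]
              have hL : pvLoopA ('\'' :: rest) pend false false false false =
                  (if pend.isEmpty then [] else [(true, String.ofList pend)]) ++
                    pvLoopA rest ['\''] false false false true := by
                simp [pvLoopA, h1, h2]
              have hlen : (pvQuotedBody '\'' rest).2.length ≤ k := by
                have := pvQuotedBody_len '\'' rest.length rest le_rfl
                omega
              rw [hL, pvLoopA_char rest.length rest ['\''] le_rfl (by simp),
                ih (pvQuotedBody '\'' rest).2 [] hlen]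
              simp
            · have hmt : pvMatchToken (c :: rest) = none := by
                simp [pvMatchToken, h1, h2, h3, h4]
              rw [pvScanB_cons_none pend hmt]
              have hL : pvLoopA (c :: rest) pend false false false false =
                  pvLoopA rest (pend ++ [c]) false false false false := by
                simp [pvLoopA, h1, h2, h3, h4]
              rw [hL]
              exact ih rest (pend ++ [c]) (by omega)

-- ===== VERDICT (by name: the statement is the Claim_ definition above) =====
theorem split_code_segments_py_spec : Claim_equal_split_code_segments_py := by
  intro code _
  unfold Spec_split_code_segments_py split_code_segments_py split_code_segments_py_alt
  exact pvLoopA_eq_pvScanB code.toList.length code.toList [] le_rfl
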